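-- pv_equiv track=rewrite | github.com/WaleedK2000/C-BAS_Node_Module | blue_team_scripts/main_scan.py | separate_severity
-- ===== SOURCE A (Python) =====
-- def separate_severity(result):
--     low_sev = [d for d in result if d['severity'] == 'low']
--     med_sev = [d for d in result if d['severity'] == 'medium']
--     high_sev = [d for d in result if d['severity'] == 'high']
--     low_sev_count = len(low_sev)
--     med_sev_count = len(med_sev)
--     high_sev_count = len(high_sev)
--     return high_sev, low_sev_count, med_sev_count
-- ===== SOURCE B (Python) =====
-- def separate_severity(result):
--     high_sev = []
--     low_count = 0
--     med_count = 0
--     for d in result: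
--         s = d['severity']
--         if s == 'high':
--             high_sev.append(d)
--         elif s == 'low':
--             low_count += 1
--         elif s == 'medium':
--             med_count += 1
--     return high_sev, low_count, med_count
-- ===== Notes on version B (the rewrite author's own statement) =====
-- stated objective: alternative
-- what changed: Single pass with integer counters for low/medium replaces three comprehensions that each scan result and build a list.
import Mathlib
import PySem

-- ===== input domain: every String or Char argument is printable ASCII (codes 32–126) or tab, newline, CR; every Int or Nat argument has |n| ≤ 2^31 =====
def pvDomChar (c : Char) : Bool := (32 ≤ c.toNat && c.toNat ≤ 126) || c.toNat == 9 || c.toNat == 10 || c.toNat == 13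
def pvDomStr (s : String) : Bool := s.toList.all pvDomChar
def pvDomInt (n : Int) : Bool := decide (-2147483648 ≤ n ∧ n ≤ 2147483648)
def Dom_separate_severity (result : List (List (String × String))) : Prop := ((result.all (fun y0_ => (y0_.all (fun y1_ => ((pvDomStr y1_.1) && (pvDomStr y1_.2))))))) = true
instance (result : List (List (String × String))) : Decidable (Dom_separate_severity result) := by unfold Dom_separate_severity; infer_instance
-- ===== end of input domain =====

-- B fuses A's three comprehensions into one pass keeping integer counters for low/medium (objective: alternative decomposition).

-- d['severity'] : first match in the association list (dict in insertion order)
def sevGet (d : List (String × String)) : Option String :=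
  (PySem.Dict.mk d).get? "severity"

-- ===== PORT A =====
def separate_severity (result : List (List (String × String))) : (List (List (String × String))) × Int × Int :=
  let low_sev := result.filter (fun d => sevGet d == some "low")
  let med_sev := result.filter (fun d => sevGet d == some "medium")
  let high_sev := result.filter (fun d => sevGet d == some "high")
  (high_sev, (low_sev.length : Int), (med_sev.length : Int))

-- ===== PORT B =====
def separate_severity_alt (result : List (List (String × String))) : (List (List (String × String))) × Int × Int :=
  result.foldl
    (fun (acc : (List (List (String × String))) × Int × Int) d =>
      let s := sevGet d
      if s == some "high" then (acc.1 ++ [d], acc.2.1, acc.2.2)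
      else if s == some "low" then (acc.1, acc.2.1 + 1, acc.2.2)
      else if s == some "medium" then (acc.1, acc.2.1, acc.2.2 + 1)
      else acc)
    ([], 0, 0)

-- ===== PRECONDITION & SPEC =====
-- Pre_ excludes exactly the inputs where A raises KeyError: some dict lacks a 'severity' key.
def Pre_separate_severity (result : List (List (String × String))) : Prop :=
  (result.all (fun d => (sevGet d).isSome)) = true
instance (result : List (List (String × String))) : Decidable (Pre_separate_severity result) := by unfold Pre_separate_severity; infer_instance

def pvWitness_separate_severity : (List (List (String × String))) :=
  [[("severity", "high")], [("severity", "low")], [("severity", "medium"), ("x", "y")]]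

def Spec_separate_severity (result : List (List (String × String))) (out : (List (List (String × String))) × Int × Int) : Prop := out = separate_severity_alt result
instance (result : List (List (String × String))) (out : (List (List (String × String))) × Int × Int) : Decidable (Spec_separate_severity result out) := by unfold Spec_separate_severity; infer_instance

-- ===== CLAIM (what is proved, stated in full; the proofs are below) =====
def Claim_equal_separate_severity : Prop := ∀ (result : List (List (String × String))), Dom_separate_severity result → Pre_separate_severity result → Spec_separate_severity result (separate_severity result)

-- ===== LEMMAS AND PROOFS =====

-- The single-pass fold from an arbitrary accumulator equals the three-filter result shifted by the accumulator.
lemma alt_foldl_eq (result : List (List (String × String)))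
    (acc : (List (List (String × String))) × Int × Int) :
    result.foldl
      (fun (acc : (List (List (String × String))) × Int × Int) d =>
        let s := sevGet d
        if s == some "high" then (acc.1 ++ [d], acc.2.1, acc.2.2)
        else if s == some "low" then (acc.1, acc.2.1 + 1, acc.2.2)
        else if s == some "medium" then (acc.1, acc.2.1, acc.2.2 + 1)
        else acc)
      acc
    = (acc.1 ++ result.filter (fun d => sevGet d == some "high"),
       acc.2.1 + ((result.filter (fun d => sevGet d == some "low")).length : Int),
       acc.2.2 + ((result.filter (fun d => sevGet d == some "medium")).length : Int)) := by
  induction result generalizing acc with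
  | nil => simp
  | cons d rest ih =>
    simp only [List.foldl_cons, List.filter_cons, ih]
    by_cases hh : sevGet d = some "high" <;> by_cases hl : sevGet d = some "low" <;>
      by_cases hm : sevGet d = some "medium" <;>
      simp_all [Prod.ext_iff] <;> omega

-- ===== VERDICT (by name: the statement is the Claim_ definition above) =====
theorem separate_severity_spec : Claim_equal_separate_severity := by
  intro result _ _
  show separate_severity result = separate_severity_alt result
  rw [separate_severity_alt, alt_foldl_eq]
  simp [separate_severity]
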